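-- pv_equiv track=rewrite | github.com/eglinmartin/AdventOfCode2025 | src/day4.py | day_four
-- ===== SOURCE A (Python) =====
-- def get_paper_rolls(data):
--     count = 0
--     rolls_to_remove = []
--
--     for i, row in enumerate(data):
--         for j, col in enumerate(row):
--             num_rows = len(data)
--             num_cols = len(row)
--
--             directions = [(0, 1), (1, 1), (1, 0), (1, -1), (0, -1), (-1, -1), (-1, 0), (-1, 1)]
--             adjacent_tiles = [(i+dir_val[0], j+dir_val[1]) for dir_val in directions]
--
--             adjacent_tiles_filtered = [tile_set for tile_set in adjacent_tiles if 0 <= tile_set[0] < num_rows and 0 <= tile_set[1] < num_cols]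
--             num_adjacent = [tile_set for tile_set in adjacent_tiles_filtered if data[tile_set[0]][tile_set[1]] == '@']
--
--             if data[i][j] == '@' and len(num_adjacent) < 4:
--                 count += 1
--                 rolls_to_remove.append([i, j])
--
--     for index in rolls_to_remove:
--         data[index[0]][index[1]] = 'x'
--
--     return count
--
-- def day_four(data):
--     count_one = 0
--     count_two = 0
--
--     data_one = [list(line) for line in data]
--     num_rolls = get_paper_rolls(data_one)
--     count_one += num_rolls
--
--     data_two = [list(line) for line in data]
--     while True:
--         num_rolls = get_paper_rolls(data_two)
--         count_two += num_rolls
--         if num_rolls <= 0: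
--             break
--
--     return count_one, count_two
-- ===== SOURCE B (Python) =====
-- def day_four(data):
--     # Fixpoint peeling on the set of live '@' coordinates: no grid mutation and no
--     # per-cell bounds checks; each round filters the live list using O(1) set membership.
--     h = len(data)
--     w = len(data[0]) if data else 0
--     live = [(i, j) for i in range(h) for j in range(w) if data[i][j] == '@']
--     dirs = ((0, 1), (1, 1), (1, 0), (1, -1), (0, -1), (-1, -1), (-1, 0), (-1, 1))
--
--     def step(cells):
--         s = set(cells)
--         return [c for c in cells
--                 if sum(((c[0] + di, c[1] + dj) in s) for di, dj in dirs) >= 4]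
--
--     n0 = len(live)
--     count_one = n0 - len(step(live))
--     cur = live
--     while True:
--         nxt = step(cur)
--         if len(nxt) == len(cur):
--             break
--         cur = nxt
--     return count_one, n0 - len(cur)
-- ===== Notes on version B (the rewrite author's own statement) =====
-- stated objective: faster
-- what changed: B never touches the character grid: it extracts the list of '@' coordinates once, keeps a coordinate set for O(1) neighbour membership tests, and repeatedly filters that live list (examining only live cells and their 8 neighbours) until its size is stable, instead of A's per-round rescan of every grid cell that rebuilds bounds-filtered neighbour lists and marks removed cells 'x' in place.
import Mathlib
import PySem

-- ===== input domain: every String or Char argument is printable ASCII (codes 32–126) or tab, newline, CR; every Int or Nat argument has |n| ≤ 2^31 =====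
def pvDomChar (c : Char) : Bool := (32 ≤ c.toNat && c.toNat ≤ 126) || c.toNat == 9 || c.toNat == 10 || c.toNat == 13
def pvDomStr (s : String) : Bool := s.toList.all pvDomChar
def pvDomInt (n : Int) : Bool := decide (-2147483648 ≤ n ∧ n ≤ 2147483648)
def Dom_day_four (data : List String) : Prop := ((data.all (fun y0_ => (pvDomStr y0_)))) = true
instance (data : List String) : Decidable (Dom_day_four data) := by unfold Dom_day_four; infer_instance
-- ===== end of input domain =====

-- B replaces A's per-round whole-grid rescans and in-place 'x'-marking with a fixpoint peeling
-- on the list of live '@' coordinates (only live cells are re-examined each round; measured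
-- faster in a timing run). Equivalence is about the return value only — A's helper mutates
-- its local grid copies, B mutates nothing the caller can see.


-- ===== PORT A =====

def pvDirections : List (Int × Int) :=
  [(0, 1), (1, 1), (1, 0), (1, -1), (0, -1), (-1, -1), (-1, 0), (-1, 1)]

-- data[a][b]; indices are in range wherever A evaluates this on inputs Pre_day_four admits,
-- so the defaults are never read
def pvCellA (data : List (List Char)) (a b : Int) : Char :=
  PySem.List.pyGetD (PySem.List.pyGetD data a []) b ' '

-- get_paper_rolls: returns (count, updated grid) — the Python mutates its argument in place
def get_paper_rolls (data : List (List Char)) : Int × List (List Char) :=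
  let cr : Int × List (Int × Int) :=
    (PySem.List.enumerate data).foldl (fun acc ir =>
      (PySem.List.enumerate ir.2).foldl (fun acc2 jc =>
        let num_rows : Int := PySem.List.len data
        let num_cols : Int := PySem.List.len ir.2
        let adjacent_tiles := pvDirections.map (fun d => (ir.1 + d.1, jc.1 + d.2))
        let adjacent_tiles_filtered := adjacent_tiles.filter
          (fun t => decide (0 ≤ t.1 ∧ t.1 < num_rows ∧ 0 ≤ t.2 ∧ t.2 < num_cols))
        let num_adjacent := adjacent_tiles_filtered.filter (fun t => pvCellA data t.1 t.2 == '@')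
        if pvCellA data ir.1 jc.1 = '@' ∧ PySem.List.len num_adjacent < 4 then
          (acc2.1 + 1, acc2.2 ++ [(ir.1, jc.1)])     -- rolls_to_remove entry [i, j] as the pair (i, j)
        else acc2) acc) (0, [])
  let data' := cr.2.foldl (fun g idx =>
      PySem.List.pySetD g idx.1 (PySem.List.pySetD (PySem.List.pyGetD g idx.1 []) idx.2 'x')) data
  (cr.1, data')

-- fuel bound for A's 'while True' loop (each round with num_rolls > 0 removes ≥ 1 '@'; proved below)
def pvAtCount (g : List (List Char)) : Nat := (g.map (fun row => row.countP (fun c => c == '@'))).sum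

def pvLoopA : Nat → List (List Char) → Int → Int
  | 0, _, count_two => count_two      -- fuel exhausted: never reached from day_four (proved below)
  | Nat.succ fuel, g, count_two =>
    let r := get_paper_rolls g
    let count_two' := count_two + r.1
    if r.1 ≤ 0 then count_two' else pvLoopA fuel r.2 count_two'

def day_four (data : List String) : Int × Int :=
  let data_one := data.map (fun line => line.toList)
  let count_one := 0 + (get_paper_rolls data_one).1
  let data_two := data.map (fun line => line.toList)
  let count_two := pvLoopA (pvAtCount data_two + 2) data_two 0
  (count_one, count_two)

-- ===== PORT B =====

def pvDirsB : List (Int × Int) :=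
  [(0, 1), (1, 1), (1, 0), (1, -1), (0, -1), (-1, -1), (-1, 0), (-1, 1)]

-- step(cells): keep the cells with ≥ 4 live neighbours (sum of booleans = countP)
def pvStep (cells : List (Int × Int)) : List (Int × Int) :=
  let s : PySem.Set (Int × Int) := PySem.Set.ofList cells
  cells.filter (fun c =>
    decide (4 ≤ pvDirsB.countP (fun d => PySem.Set.contains s (c.1 + d.1, c.2 + d.2))))

-- while True: nxt = step(cur); if len(nxt) == len(cur): break; cur = nxt
-- (fuel bound: every continuing iteration strictly shrinks cur, so |live|+1 suffices; proved below)
def pvPeel : Nat → List (Int × Int) → List (Int × Int)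
  | 0, cur => cur
  | Nat.succ fuel, cur =>
    let nxt := pvStep cur
    if nxt.length = cur.length then cur else pvPeel fuel nxt

def day_four_alt (data : List String) : Int × Int :=
  let grid := data.map (fun line => line.toList)
  let h : Int := PySem.List.len data
  let w : Int := if data = [] then 0 else PySem.List.len (PySem.List.pyGetD grid 0 [])
  -- live = [(i, j) for i in range(h) for j in range(w) if data[i][j] == '@']
  let live := (PySem.List.pyRange 0 h 1).flatMap (fun i =>
    (PySem.List.pyRange 0 w 1).filterMap (fun j =>
      if PySem.List.pyGetD (PySem.List.pyGetD grid i []) j ' ' = '@' then some (i, j)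
      else none))
  let n0 : Int := PySem.List.len live
  let count_one := n0 - PySem.List.len (pvStep live)
  let fin := pvPeel (live.length + 1) live
  (count_one, n0 - PySem.List.len fin)

-- ===== PRECONDITION & SPEC =====
-- Pre_ excludes exactly the ragged inputs (two adjacent rows of different lengths — equivalently,
-- not all rows equal): there A's neighbour bounds check uses the current row's length, indexes a
-- shorter neighbouring row, and raises IndexError.
def Pre_day_four (data : List String) : Prop :=
  ∀ s ∈ data, s.toList.length = (data.headD "").toList.length
instance (data : List String) : Decidable (Pre_day_four data) := by unfold Pre_day_four; infer_instance

def pvWitness_day_four : List String := ["@@.", "@@@", ".x@"]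

def Spec_day_four (data : List String) (out : Int × Int) : Prop := out = day_four_alt data
instance (data : List String) (out : Int × Int) : Decidable (Spec_day_four data out) := by unfold Spec_day_four; infer_instance

-- ===== CLAIM (what is proved, stated in full; the proofs are below) =====
def Claim_equal_day_four : Prop := ∀ (data : List String), Dom_day_four data → Pre_day_four data → Spec_day_four data (day_four data)

-- ===== LEMMAS AND PROOFS =====

-- rectangular grid
def pvRect (g : List (List Char)) : Prop := ∀ r ∈ g, r.length = (g.headD []).length

-- the list of live '@' coordinates of a grid, in scan order (proof-side normal form)
def pvLive (grid : List (List Char)) : List (Int × Int) :=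
  (PySem.List.enumerate grid).flatMap (fun ir =>
    (PySem.List.enumerate ir.2).filterMap (fun jc =>
      if jc.2 = '@' then some (ir.1, jc.1) else none))

-- all coordinates of the grid, in scan order
def pvIdx (g : List (List Char)) : List (Int × Int) :=
  (PySem.List.enumerate g).flatMap (fun ir =>
    (PySem.List.enumerate ir.2).map (fun jc => (ir.1, jc.1)))

-- A's removal condition at one coordinate, with the current row recovered from the grid
def pvCondA (g : List (List Char)) (c : Int × Int) : Bool :=
  decide (pvCellA g c.1 c.2 = '@' ∧
    PySem.List.len (((pvDirections.map (fun d => (c.1 + d.1, c.2 + d.2))).filter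
        (fun t => decide (0 ≤ t.1 ∧ t.1 < PySem.List.len g ∧ 0 ≤ t.2 ∧
          t.2 < PySem.List.len (PySem.List.pyGetD g c.1 [])))).filter
      (fun t => pvCellA g t.1 t.2 == '@')) < 4)

-- B's keep condition at one coordinate
def pvKeep (g : List (List Char)) (c : Int × Int) : Bool :=
  decide (4 ≤ pvDirsB.countP (fun d => decide ((c.1 + d.1, c.2 + d.2) ∈ pvLive g)))

-- one cell update of A's removal loop
def pvUpd (g : List (List Char)) (idx : Int × Int) : List (List Char) :=
  PySem.List.pySetD g idx.1 (PySem.List.pySetD (PySem.List.pyGetD g idx.1 []) idx.2 'x')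

-- A's removal list
def pvRolls (g : List (List Char)) : List (Int × Int) :=
  (PySem.List.enumerate g).flatMap (fun ir =>
    ((PySem.List.enumerate ir.2).filter (fun jc =>
      decide (pvCellA g ir.1 jc.1 = '@' ∧
        PySem.List.len (((pvDirections.map (fun d => (ir.1 + d.1, jc.1 + d.2))).filter
            (fun t => decide (0 ≤ t.1 ∧ t.1 < PySem.List.len g ∧ 0 ≤ t.2 ∧
              t.2 < PySem.List.len ir.2))).filter
          (fun t => pvCellA g t.1 t.2 == '@')) < 4))).map (fun jc => (ir.1, jc.1)))

def pvValid (g : List (List Char)) (c : Int × Int) : Prop :=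
  ∃ a b : Nat, c = ((a : Int), (b : Int)) ∧ a < g.length ∧ b < (g.getD a []).length

-- generic loop shapes
theorem pv_foldl_count_append {α β : Type} (p : α → Prop) [DecidablePred p] (f : α → β)
    (l : List α) : ∀ (a : Int × List β),
    l.foldl (fun acc x => if p x then (acc.1 + 1, acc.2 ++ [f x]) else acc) a
      = (a.1 + (((l.filter (fun x => decide (p x))).map f).length : Int),
         a.2 ++ (l.filter (fun x => decide (p x))).map f) := by
  induction l with
  | nil => intro a; simp
  | cons x xs ih =>
    intro a
    by_cases h : p x
    · simp only [List.foldl_cons, List.filter_cons, decide_eq_true_eq, h, ite_true,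
        List.map_cons, List.length_cons, ih, List.append_assoc, List.singleton_append,
        Prod.mk.injEq]
      exact ⟨by push_cast; ring, trivial⟩
    · simp [h, ih]

theorem pv_foldl_sum_append {α β : Type} (n : α → Nat) (s : α → List β) (l : List α) :
    ∀ (a : Int × List β),
    l.foldl (fun acc x => (acc.1 + (n x : Int), acc.2 ++ s x)) a
      = (a.1 + ((l.map n).sum : Int), a.2 ++ l.flatMap s) := by
  induction l with
  | nil => intro a; simp
  | cons x xs ih =>
    intro a
    simp only [List.foldl_cons, ih, List.map_cons, List.sum_cons, List.flatMap_cons,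
      List.append_assoc, Prod.mk.injEq]
    exact ⟨by push_cast; ring, trivial⟩

theorem pv_filterMap_ite {α β : Type} (p : α → Prop) [DecidablePred p] (f : α → β) (l : List α) :
    l.filterMap (fun x => if p x then some (f x) else none)
      = (l.filter (fun x => decide (p x))).map f := by
  induction l with
  | nil => rfl
  | cons x xs ih =>
    by_cases h : p x <;> simp [h, ih]

theorem pv_gpr_eq (g : List (List Char)) :
    get_paper_rolls g = (((pvRolls g).length : Int), (pvRolls g).foldl pvUpd g) := by
  simp only [get_paper_rolls, pv_foldl_count_append, pv_foldl_sum_append, List.nil_append]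
  simp only [pvRolls, List.length_flatMap, zero_add]
  rfl

theorem pv_flat_eq_filter (g : List (List Char)) (P : Int × List Char → Int × Char → Bool)
    (p : Int × Int → Bool)
    (hp : ∀ (k : Nat) (hk : k < g.length) (j : Nat) (hj : j < g[k].length),
      P ((k : Int), g[k]) ((j : Int), g[k][j]) = p ((k : Int), (j : Int))) :
    (PySem.List.enumerate g).flatMap (fun ir =>
      ((PySem.List.enumerate ir.2).filter (P ir)).map (fun jc => (ir.1, jc.1)))
      = (pvIdx g).filter p := by
  simp only [pvIdx, List.filter_flatMap]
  apply List.flatMap_congr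
  intro ir hir
  rw [PySem.List.mem_enumerate_iff] at hir
  obtain ⟨k, hk, rfl⟩ := hir
  rw [List.filter_map]
  apply congrArg
  apply List.filter_congr
  intro jc hjc
  rw [PySem.List.mem_enumerate_iff] at hjc
  obtain ⟨j, hj, rfl⟩ := hjc
  simpa using hp k hk j hj

theorem pv_mem_pvIdx (g : List (List Char)) (c : Int × Int) :
    c ∈ pvIdx g ↔ ∃ i j : Nat, i < g.length ∧ j < (g.getD i []).length
      ∧ c = ((i : Int), (j : Int)) := by
  simp only [pvIdx, List.mem_flatMap, PySem.List.mem_enumerate_iff, List.mem_map]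
  constructor
  · rintro ⟨ir, ⟨k, hk, rfl⟩, jc, ⟨j, hj, rfl⟩, rfl⟩
    exact ⟨k, j, hk, by rw [List.getD_eq_getElem _ _ hk]; exact hj, by simp⟩
  · rintro ⟨i, j, hi, hj, rfl⟩
    rw [List.getD_eq_getElem _ _ hi] at hj
    exact ⟨(i, g[i]), ⟨i, hi, by simp⟩, (j, g[i][j]), ⟨j, hj, by simp⟩, by simp⟩

theorem pv_rolls_eq (g : List (List Char)) :
    pvRolls g = (pvIdx g).filter (pvCondA g) := by
  rw [pvRolls, pv_flat_eq_filter g _ (pvCondA g)]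
  intro k hk j hj
  simp only [pvCondA, PySem.List.pyGetD_natCast, List.getD_eq_getElem _ _ hk]

theorem pv_live_eq (g : List (List Char)) :
    pvLive g = (pvIdx g).filter (fun c => pvCellA g c.1 c.2 == '@') := by
  rw [pvLive]
  simp only [pv_filterMap_ite]
  rw [pv_flat_eq_filter g _ (fun c => pvCellA g c.1 c.2 == '@')]
  intro k hk j hj
  simp [pvCellA, List.getD, hk, hj, Bool.beq_eq_decide_eq]

theorem pv_mem_pvLive (g : List (List Char)) (c : Int × Int) :
    c ∈ pvLive g ↔ ∃ i j : Nat, i < g.length ∧ j < (g.getD i []).length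
      ∧ c = ((i : Int), (j : Int)) ∧ pvCellA g (i : Int) (j : Int) = '@' := by
  rw [pv_live_eq, List.mem_filter]
  simp only [pv_mem_pvIdx]
  constructor
  · rintro ⟨⟨i, j, hi, hj, rfl⟩, hc⟩
    exact ⟨i, j, hi, hj, rfl, by simpa using hc⟩
  · rintro ⟨i, j, hi, hj, rfl, hc⟩
    exact ⟨⟨i, j, hi, hj, rfl⟩, by simpa using hc⟩

theorem pv_cond_split (g : List (List Char)) (hr : pvRect g) (c : Int × Int)
    (hc : c ∈ pvIdx g) :
    pvCondA g c = (pvCellA g c.1 c.2 == '@' && ! pvKeep g c) := by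
  obtain ⟨i, j, hi, hj, rfl⟩ := (pv_mem_pvIdx g c).1 hc
  have hW : ∀ k : Nat, k < g.length → (g.getD k []).length = (g.headD []).length := by
    intro k hk
    rw [List.getD_eq_getElem _ _ hk]
    exact hr _ (List.getElem_mem hk)
  have hmem : ∀ d : Int × Int, ((i : Int) + d.1, (j : Int) + d.2) ∈ pvLive g ↔
      (pvCellA g ((i : Int) + d.1) ((j : Int) + d.2) = '@' ∧ 0 ≤ (i : Int) + d.1 ∧
        (i : Int) + d.1 < (g.length : Int) ∧ 0 ≤ (j : Int) + d.2 ∧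
        (j : Int) + d.2 < ((g.getD i []).length : Int)) := by
    intro d
    rw [pv_mem_pvLive]
    constructor
    · rintro ⟨a, b, ha, hb, heq, hcell⟩
      have h1 : (i : Int) + d.1 = (a : Int) := congrArg Prod.fst heq
      have h2 : (j : Int) + d.2 = (b : Int) := congrArg Prod.snd heq
      have h3 := hW i hi
      have h4 := hW a ha
      rw [h1, h2]
      exact ⟨hcell, by omega, by omega, by omega, by omega⟩
    · rintro ⟨hcell, h0a, hah, h0b, hbw⟩
      refine ⟨((i : Int) + d.1).toNat, ((j : Int) + d.2).toNat, by omega, ?_, ?_, ?_⟩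
      · have h3 := hW i hi
        have h4 := hW (((i : Int) + d.1).toNat) (by omega)
        omega
      · simp [Int.toNat_of_nonneg h0a, Int.toNat_of_nonneg h0b]
      · rw [Int.toNat_of_nonneg h0a, Int.toNat_of_nonneg h0b]; exact hcell
  simp only [pvCondA, pvKeep]
  rw [Bool.eq_iff_iff]
  simp only [decide_eq_true_eq, Bool.and_eq_true, beq_iff_eq, Bool.not_eq_true',
    decide_eq_false_iff_not]
  have hcnt : PySem.List.len (((pvDirections.map (fun d => ((i : Int) + d.1, (j : Int) + d.2))).filter
        (fun t => decide (0 ≤ t.1 ∧ t.1 < PySem.List.len g ∧ 0 ≤ t.2 ∧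
          t.2 < PySem.List.len (PySem.List.pyGetD g (i : Int) [])))).filter
      (fun t => pvCellA g t.1 t.2 == '@'))
      = ((pvDirsB.countP (fun d => decide (((i : Int) + d.1, (j : Int) + d.2) ∈ pvLive g)) : Nat) : Int) := by
    rw [PySem.List.len_eq, List.filter_filter, List.filter_map, List.length_map,
      ← List.countP_eq_length_filter, show pvDirsB = pvDirections from rfl]
    rw [Nat.cast_inj]
    apply List.countP_congr
    intro d hd
    rw [Bool.eq_iff_iff]
    simp only [Function.comp, Bool.and_eq_true, beq_iff_eq, decide_eq_true_eq,
      PySem.List.pyGetD_natCast, PySem.List.len_eq, hmem d]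
    tauto
  rw [hcnt]
  constructor
  · rintro ⟨h1, h2⟩; exact ⟨h1, by omega⟩
  · rintro ⟨h1, h2⟩; exact ⟨h1, by omega⟩

theorem pv_step_eq (g : List (List Char)) :
    pvStep (pvLive g) = (pvLive g).filter (pvKeep g) := by
  simp only [pvStep]
  apply List.filter_congr
  intro c hc
  have : pvDirsB.countP (fun d => PySem.Set.contains (PySem.Set.ofList (pvLive g)) (c.1 + d.1, c.2 + d.2))
      = pvDirsB.countP (fun d => decide ((c.1 + d.1, c.2 + d.2) ∈ pvLive g)) := by
    apply List.countP_congr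
    intro d hd
    rw [Bool.eq_iff_iff]
    simp [PySem.Set.mem_ofList]
  rw [this, pvKeep]

theorem pv_rolls_split (g : List (List Char)) (hr : pvRect g) :
    pvRolls g = (pvLive g).filter (fun c => ! pvKeep g c) := by
  rw [pv_rolls_eq, pv_live_eq, List.filter_filter]
  apply List.filter_congr
  intro c hc
  rw [pv_cond_split g hr c hc, Bool.and_comm]

theorem pv_len_split (g : List (List Char)) (hr : pvRect g) :
    (pvStep (pvLive g)).length + (pvRolls g).length = (pvLive g).length := by
  rw [pv_rolls_split g hr, pv_step_eq g]
  exact (List.length_eq_length_filter_add (pvKeep g)).symm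

theorem pv_valid_shape (g g' : List (List Char)) (h : g.map List.length = g'.map List.length)
    (c : Int × Int) : pvValid g c ↔ pvValid g' c := by
  have key : ∀ (G : List (List Char)) (a : Nat), (G.getD a []).length = (G.map List.length).getD a 0 := by
    intro G a
    rcases h' : G[a]? with _ | row <;>
      simp [List.getD_eq_getElem?_getD, List.getElem?_map, h']
  have hlen : g.length = g'.length := by
    have := congrArg List.length h; simpa using this
  have hrow : ∀ a : Nat, (g.getD a []).length = (g'.getD a []).length := by
    intro a; rw [key g a, key g' a, h]
  constructor <;> rintro ⟨a, b, rfl, ha, hb⟩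
  · exact ⟨a, b, rfl, by omega, by rw [← hrow]; exact hb⟩
  · exact ⟨a, b, rfl, by omega, by rw [hrow]; exact hb⟩

theorem pv_upd_shape (g : List (List Char)) (c : Int × Int) (h : pvValid g c) :
    (pvUpd g c).map List.length = g.map List.length := by
  obtain ⟨a, b, rfl, ha, hb⟩ := h
  simp only [pvUpd, PySem.List.pySetD_natCast, PySem.List.pyGetD_natCast, List.map_set,
    List.length_set]
  rw [List.getD_eq_getElem _ _ ha]
  have hv : g[a].length = (g.map List.length)[a]'(by simpa using ha) := by simp
  rw [hv, List.set_getElem_self]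

theorem pv_upd_cell (g : List (List Char)) (c : Int × Int) (h : pvValid g c) (i j : Nat) :
    pvCellA (pvUpd g c) (i : Int) (j : Int)
      = if c = ((i : Int), (j : Int)) then 'x' else pvCellA g (i : Int) (j : Int) := by
  obtain ⟨a, b, rfl, ha, hb⟩ := h
  rw [List.getD_eq_getElem _ _ ha] at hb
  simp only [pvCellA, pvUpd, PySem.List.pySetD_natCast, PySem.List.pyGetD_natCast,
    List.getD_eq_getElem?_getD, List.getElem?_set, Prod.mk.injEq, Nat.cast_inj]
  by_cases hai : a = i
  · subst hai
    simp only [ha, if_true, true_and]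
    rw [List.getElem?_eq_getElem ha]
    simp only [Option.getD_some]
    by_cases hbj : b = j
    · subst hbj
      simp [hb]
    · simp [hbj]
  · simp [hai]

theorem pv_fold_shape (R : List (Int × Int)) : ∀ (g : List (List Char)),
    (∀ c ∈ R, pvValid g c) → (R.foldl pvUpd g).map List.length = g.map List.length := by
  induction R with
  | nil => intro g _; rfl
  | cons c R ih =>
    intro g hv
    have hc := hv c List.mem_cons_self
    have hsh := pv_upd_shape g c hc
    simp only [List.foldl_cons]
    rw [ih (pvUpd g c) (fun x hx =>
      (pv_valid_shape g (pvUpd g c) hsh.symm x).1 (hv x (List.mem_cons_of_mem c hx))), hsh]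

theorem pv_fold_cell (R : List (Int × Int)) : ∀ (g : List (List Char)),
    (∀ c ∈ R, pvValid g c) → ∀ i j : Nat,
    pvCellA (R.foldl pvUpd g) (i : Int) (j : Int)
      = if ((i : Int), (j : Int)) ∈ R then 'x' else pvCellA g (i : Int) (j : Int) := by
  induction R with
  | nil => intro g _ i j; simp
  | cons c R ih =>
    intro g hv i j
    have hc := hv c List.mem_cons_self
    have hsh := pv_upd_shape g c hc
    simp only [List.foldl_cons]
    rw [ih (pvUpd g c) (fun x hx =>
      (pv_valid_shape g (pvUpd g c) hsh.symm x).1 (hv x (List.mem_cons_of_mem c hx))) i j,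
      pv_upd_cell g c hc i j]
    by_cases h1 : ((i : Int), (j : Int)) ∈ R
    · simp [List.mem_cons, h1]
    · by_cases h2 : c = ((i : Int), (j : Int))
      · simp [List.mem_cons, h1, h2]
      · simp [List.mem_cons, h1, h2, Ne.symm h2]

theorem pv_rolls_valid (g : List (List Char)) : ∀ c ∈ pvRolls g, pvValid g c := by
  intro c hc
  rw [pv_rolls_eq] at hc
  obtain ⟨i, j, hi, hj, rfl⟩ := (pv_mem_pvIdx g c).1 (List.mem_filter.mp hc).1
  exact ⟨i, j, rfl, hi, hj⟩

theorem pv_idx_shape (g g' : List (List Char)) (h : g.map List.length = g'.map List.length) :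
    pvIdx g = pvIdx g' := by
  suffices haux : ∀ (g g' : List (List Char)) (s : Int), g.map List.length = g'.map List.length →
      (PySem.List.enumerate g s).flatMap (fun ir =>
        (PySem.List.enumerate ir.2).map (fun jc => (ir.1, jc.1)))
      = (PySem.List.enumerate g' s).flatMap (fun ir =>
        (PySem.List.enumerate ir.2).map (fun jc => (ir.1, jc.1))) by
    exact haux g g' 0 h
  intro g
  induction g with
  | nil =>
    intro g' s h
    rw [List.map_nil] at h
    rw [(List.map_eq_nil_iff.mp h.symm)]
  | cons r t ih =>
    intro g' s h
    cases g' with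
    | nil => simp at h
    | cons r' t' =>
      simp only [List.map_cons, List.cons.injEq] at h
      simp only [PySem.List.enumerate_cons, List.flatMap_cons]
      rw [ih t' (s + 1) h.2]
      congr 1
      have key : ∀ (row : List Char), (PySem.List.enumerate row).map (fun jc => ((s : Int), jc.1))
          = (PySem.List.pyRange 0 (0 + row.length) 1).map (fun x => ((s : Int), x)) := by
        intro row
        rw [show (fun jc : Int × Char => ((s : Int), jc.1))
          = (fun x : Int => ((s : Int), x)) ∘ (fun jc : Int × Char => jc.1) from rfl]
        rw [← List.map_map, PySem.List.map_fst_enumerate]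
      rw [key r, key r', h.1]

theorem pv_rect_shape (g g' : List (List Char)) (h : g.map List.length = g'.map List.length)
    (hr : pvRect g) : pvRect g' := by
  have hhead : (g.headD []).length = (g'.headD []).length := by
    cases g with
    | nil => cases g' with
      | nil => rfl
      | cons a b => simp at h
    | cons a b =>
      cases g' with
      | nil => simp at h
      | cons a' b' => simpa using congrArg (fun l => l.headD 0) h
  intro r hrm
  have h1 : r.length ∈ g.map List.length := by
    rw [h]; exact List.mem_map_of_mem hrm
  obtain ⟨r0, hr0, hlen⟩ := List.mem_map.mp h1
  rw [← hhead, ← hlen]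
  exact hr r0 hr0

theorem pv_atcount_eq (g : List (List Char)) : pvAtCount g = (pvLive g).length := by
  rw [pvAtCount, pvLive, List.length_flatMap]
  have hrow : ∀ ir : Int × List Char,
      ((PySem.List.enumerate ir.2).filterMap (fun jc =>
        if jc.2 = '@' then some (ir.1, jc.1) else none)).length
      = ir.2.countP (fun c => c == '@') := by
    intro ir
    rw [pv_filterMap_ite, List.length_map, ← List.countP_eq_length_filter]
    conv_rhs => rw [← PySem.List.map_snd_enumerate ir.2 0]
    rw [List.countP_map]
    apply List.countP_congr
    intro jc _
    simp [Function.comp, Bool.beq_eq_decide_eq]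
  simp only [hrow]
  conv_lhs => rw [← PySem.List.map_snd_enumerate g 0]
  rw [List.map_map]
  rfl

theorem pv_next_shape (g : List (List Char)) :
    ((get_paper_rolls g).2).map List.length = g.map List.length := by
  rw [pv_gpr_eq]
  exact pv_fold_shape _ g (pv_rolls_valid g)

theorem pv_next_live (g : List (List Char)) (hr : pvRect g) :
    pvLive ((get_paper_rolls g).2) = pvStep (pvLive g) := by
  have hval := pv_rolls_valid g
  have hsh : ((get_paper_rolls g).2).map List.length = g.map List.length := pv_next_shape g
  rw [pv_live_eq, pv_step_eq, pv_live_eq, List.filter_filter, pv_idx_shape _ g hsh]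
  apply List.filter_congr
  intro c hc
  obtain ⟨i, j, hi, hj, rfl⟩ := (pv_mem_pvIdx g c).1 hc
  have hfc : pvCellA ((get_paper_rolls g).2) (i : Int) (j : Int)
      = if ((i : Int), (j : Int)) ∈ pvRolls g then 'x' else pvCellA g (i : Int) (j : Int) := by
    rw [pv_gpr_eq]
    exact pv_fold_cell (pvRolls g) g hval i j
  rw [hfc]
  by_cases hm : ((i : Int), (j : Int)) ∈ pvRolls g
  · have hcond : pvCondA g ((i : Int), (j : Int)) = true := by
      rw [pv_rolls_eq] at hm
      exact (List.mem_filter.mp hm).2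
    rw [pv_cond_split g hr _ hc] at hcond
    simp only [Bool.and_eq_true, beq_iff_eq, Bool.not_eq_true'] at hcond
    simp [hm, hcond.1, hcond.2]
  · have hcond : pvCondA g ((i : Int), (j : Int)) = false := by
      by_contra hcc
      rw [Bool.not_eq_false] at hcc
      exact hm (by rw [pv_rolls_eq]; exact List.mem_filter.mpr ⟨hc, hcc⟩)
    rw [pv_cond_split g hr _ hc] at hcond
    rw [if_neg hm]
    cases hkeep : pvKeep g ((i : Int), (j : Int)) <;>
      cases hcell : (pvCellA g (i : Int) (j : Int) == '@') <;>
        simp_all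

theorem pv_loop_eq : ∀ (fA : Nat) (g : List (List Char)) (t : Int) (fB : Nat),
    pvRect g → pvAtCount g < fA → (pvLive g).length < fB →
    pvLoopA fA g t = t + ((pvLive g).length : Int) - ((pvPeel fB (pvLive g)).length : Int) := by
  intro fA
  induction fA with
  | zero => intro g t fB hr hA hB; omega
  | succ fA ih =>
    intro g t fB hr hA hB
    have hsplit := pv_len_split g hr
    obtain ⟨fB', rfl⟩ : ∃ fB', fB = fB' + 1 := ⟨fB - 1, by omega⟩
    have h1 : (get_paper_rolls g).1 = ((pvRolls g).length : Int) := by rw [pv_gpr_eq]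
    simp only [pvLoopA, h1]
    by_cases hz : ((pvRolls g).length : Int) ≤ 0
    · rw [if_pos hz]
      have hstep : (pvStep (pvLive g)).length = (pvLive g).length := by omega
      have hpeel : pvPeel (fB' + 1) (pvLive g) = pvLive g := by simp [pvPeel, hstep]
      rw [hpeel]
      omega
    · rw [if_neg hz]
      have hnr : 0 < (pvRolls g).length := by omega
      have hr' : pvRect ((get_paper_rolls g).2) :=
        pv_rect_shape g _ (pv_next_shape g).symm hr
      have hlive' : pvLive ((get_paper_rolls g).2) = pvStep (pvLive g) := pv_next_live g hr
      have hA' : pvAtCount ((get_paper_rolls g).2) < fA := by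
        rw [pv_atcount_eq, hlive']
        rw [pv_atcount_eq] at hA
        omega
      have hB' : (pvLive ((get_paper_rolls g).2)).length < fB' := by rw [hlive']; omega
      rw [ih ((get_paper_rolls g).2) (t + ((pvRolls g).length : Int)) fB' hr' hA' hB']
      have hne : ¬ ((pvStep (pvLive g)).length = (pvLive g).length) := by omega
      simp only [pvPeel]
      rw [if_neg hne, ← hlive']
      have hl : (pvLive ((get_paper_rolls g).2)).length = (pvStep (pvLive g)).length := by
        rw [hlive']
      omega

theorem pv_live_range_g (g : List (List Char)) (hr : pvRect g) :
    (PySem.List.pyRange 0 (PySem.List.len g) 1).flatMap (fun i =>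
      (PySem.List.pyRange 0 (if g = [] then 0
          else PySem.List.len (PySem.List.pyGetD g 0 [])) 1).filterMap (fun j =>
        if PySem.List.pyGetD (PySem.List.pyGetD g i []) j ' ' = '@' then some (i, j)
        else none))
    = pvLive g := by
  rw [pvLive, PySem.List.enumerate_eq_map_pyRange g ([] : List Char), List.flatMap_map]
  apply List.flatMap_congr
  intro i hi
  have hi' := (PySem.List.mem_pyRange_one.mp hi)
  rw [PySem.List.enumerate_eq_map_pyRange (PySem.List.pyGetD g i []) ' ', List.filterMap_map]
  have hw : (if g = [] then (0 : Int)
      else PySem.List.len (PySem.List.pyGetD g 0 []))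
      = PySem.List.len (PySem.List.pyGetD g i []) := by
    rcases g with _ | ⟨r0, rest⟩
    · simp [PySem.List.len_eq] at hi'
      omega
    · rw [if_neg (by simp)]
      have hib : 0 ≤ i ∧ i < (((r0 :: rest).length : Nat) : Int) := by
        simpa [PySem.List.len_eq] using hi'
      have h0 : PySem.List.pyGetD (r0 :: rest) (0 : Int) [] = r0 :=
        PySem.List.pyGetD_zero_cons r0 rest []
      -- both rows have the grid's common width
      have hrow : PySem.List.pyGetD (r0 :: rest) i [] = (r0 :: rest).getD i.toNat [] := by
        rw [← PySem.List.pyGetD_natCast (n := i.toNat)]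
        congr 1
        omega
      rw [h0, hrow, PySem.List.len_eq, PySem.List.len_eq]
      have hm : (r0 :: rest).getD i.toNat [] ∈ (r0 :: rest) := by
        rw [List.getD_eq_getElem _ _ (by omega)]
        exact List.getElem_mem _
      rw [hr _ hm, hr r0 List.mem_cons_self]
  rw [hw]
  rfl

theorem pv_live_range (data : List String)
    (hr : pvRect (data.map (fun line => line.toList))) :
    (PySem.List.pyRange 0 (PySem.List.len data) 1).flatMap (fun i =>
      (PySem.List.pyRange 0 (if data = [] then 0
          else PySem.List.len (PySem.List.pyGetD (data.map (fun line => line.toList)) 0 [])) 1).filterMap (fun j =>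
        if PySem.List.pyGetD (PySem.List.pyGetD (data.map (fun line => line.toList)) i []) j ' ' = '@'
        then some (i, j) else none))
    = pvLive (data.map (fun line => line.toList)) := by
  have hlen : PySem.List.len data = PySem.List.len (data.map (fun line => line.toList)) := by
    simp [PySem.List.len_eq]
  have hnil : (data = []) ↔ (data.map (fun line => line.toList) = []) := by simp
  rw [hlen, if_congr hnil rfl rfl, pv_live_range_g _ hr]

theorem pv_rect_of_pre (data : List String) (h : Pre_day_four data) :
    pvRect (data.map (fun line => line.toList)) := by
  have hh : (data.map (fun line => line.toList)).headD [] = (data.headD "").toList := by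
    cases data <;> simp
  intro r hrm
  obtain ⟨line, hl, rfl⟩ := List.mem_map.mp hrm
  rw [hh]
  exact h line hl

-- ===== VERDICT (by name: the statement is the Claim_ definition above) =====
theorem day_four_spec : Claim_equal_day_four := by
  intro data _ hpre
  show day_four data = day_four_alt data
  have hr := pv_rect_of_pre data hpre
  have h1 := pv_gpr_eq (data.map (fun line => line.toList))
  have h2 := pv_len_split (data.map (fun line => line.toList)) hr
  have h3 := pv_loop_eq (pvAtCount (data.map (fun line => line.toList)) + 2)
    (data.map (fun line => line.toList)) 0
    ((pvLive (data.map (fun line => line.toList))).length + 1) hr (by omega) (by omega)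
  simp only [day_four, day_four_alt]
  rw [pv_live_range data hr]
  simp only [h1, h3, PySem.List.len_eq, Prod.mk.injEq]
  exact ⟨by omega, by omega⟩
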